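-- pv_equiv track=rewrite | github.com/public-arch/Marithmetics | gum/authority/authority_archive/_archive/AOR_20260123T030005Z_e9cff9d/GUM_BUNDLE_v30_20260123T030005Z/capsules/DEMO-55/demo.py | admissible_triples
-- ===== SOURCE A (Python) =====
-- from typing import Dict, Iterable, List, Optional, Sequence, Tuple
--
-- def admissible_triples(pools: Dict[str, List[int]]) -> List[Tuple[int, int, int]]:
--     triples: List[Tuple[int, int, int]] = []
--     for wU in pools["U1"]:
--         for s2 in pools["SU2"]:
--             for s3 in pools["SU3"]:
--                 if wU > s2 > s3:
--                     triples.append((wU, s2, s3))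
--     triples.sort()
--     return triples
-- ===== SOURCE B (Python) =====
-- def admissible_triples(pools):
--     u1 = pools["U1"]
--     su2 = pools["SU2"]
--     su3 = pools["SU3"]
--     d1 = sorted(set(u1))
--     d2 = sorted(set(su2))
--     d3 = sorted(set(su3))
--     out = []
--     for wU in d1:
--         for s2 in d2:
--             if s2 >= wU:
--                 break
--             for s3 in d3:
--                 if s3 >= s2:
--                     break
--                 out.extend([(wU, s2, s3)] * (u1.count(wU) * su2.count(s2) * su3.count(s3)))
--     return out
-- ===== Notes on version B (the rewrite author's own statement) =====
-- stated objective: alternative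
-- what changed: Instead of collecting the full triple product and sorting it afterwards, B walks the sorted distinct values of each pool in ascending lexicographic order with early breaks (s2 >= wU, s3 >= s2) and emits each admissible triple once with multiplicity count(U1,wU)*count(SU2,s2)*count(SU3,s3), so the output is produced already sorted and no final sort is needed.
-- outside the precondition, e.g. on admissible_triples({'U1': []}): A returns [], B raises KeyError
import Mathlib
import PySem

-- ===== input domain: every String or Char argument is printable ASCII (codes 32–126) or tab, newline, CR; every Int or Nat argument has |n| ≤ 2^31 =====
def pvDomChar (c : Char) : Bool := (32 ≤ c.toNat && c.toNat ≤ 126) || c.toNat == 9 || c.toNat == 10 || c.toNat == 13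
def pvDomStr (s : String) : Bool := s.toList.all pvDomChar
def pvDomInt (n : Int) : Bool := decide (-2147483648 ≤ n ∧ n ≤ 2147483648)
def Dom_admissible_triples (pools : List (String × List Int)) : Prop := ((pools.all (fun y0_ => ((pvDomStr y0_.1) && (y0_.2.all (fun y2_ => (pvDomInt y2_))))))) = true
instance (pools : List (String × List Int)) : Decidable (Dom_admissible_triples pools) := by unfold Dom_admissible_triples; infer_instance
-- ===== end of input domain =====

-- B replaces A's full triple product + final sort by an enumeration over the sorted distinct
-- values of each pool (with early break), emitting each admissible triple once with its
-- multiplicity count(U1,wU)*count(SU2,s2)*count(SU3,s3); the output is produced already sorted.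

-- ===== PORT A =====
-- Python's tuple sort is lexicographic: ported as PySem.List.sorted with the lexicographic key below.
def pvKey (t : Int × Int × Int) : Lex (Int × Lex (Int × Int)) := toLex (t.1, toLex (t.2.1, t.2.2))

def admissible_triples (pools : List (String × List Int)) : List (Int × Int × Int) :=
  match pools.lookup "U1", pools.lookup "SU2", pools.lookup "SU3" with
  | some u1, some su2, some su3 =>
      PySem.List.sorted
        (u1.foldl (fun acc wU =>
          su2.foldl (fun acc s2 =>
            su3.foldl (fun acc s3 =>
              if wU > s2 ∧ s2 > s3 then acc ++ [(wU, s2, s3)] else acc) acc) acc) [])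
        pvKey false
  | _, _, _ => []          -- unreachable under Pre_ (KeyError in Python)

-- ===== PORT B =====
def bLoop3 (u1 su2 su3 : List Int) (wU s2 : Int) : List Int → List (Int × Int × Int)
  | [] => []
  | s3 :: rest =>
      if s3 ≥ s2 then []
      else PySem.List.pyRepeat [(wU, s2, s3)]
             ((PySem.List.count u1 wU * PySem.List.count su2 s2 * PySem.List.count su3 s3 : Nat) : Int)
           ++ bLoop3 u1 su2 su3 wU s2 rest

def bLoop2 (u1 su2 su3 d3 : List Int) (wU : Int) : List Int → List (Int × Int × Int)
  | [] => []
  | s2 :: rest =>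
      if s2 ≥ wU then []
      else bLoop3 u1 su2 su3 wU s2 d3 ++ bLoop2 u1 su2 su3 d3 wU rest

def admissible_triples_alt (pools : List (String × List Int)) : List (Int × Int × Int) :=
  match pools.lookup "U1" with
  | none => []             -- unreachable under Pre_ (KeyError in Python)
  | some u1 =>
    match pools.lookup "SU2" with
    | none => []           -- unreachable under Pre_ (KeyError in Python)
    | some su2 =>
      match pools.lookup "SU3" with
      | none => []         -- unreachable under Pre_ (KeyError in Python)
      | some su3 =>
        let d1 := PySem.List.sorted (PySem.Set.ofList u1) (fun x => x) false
        let d2 := PySem.List.sorted (PySem.Set.ofList su2) (fun x => x) false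
        let d3 := PySem.List.sorted (PySem.Set.ofList su3) (fun x => x) false
        d1.foldl (fun acc wU => acc ++ bLoop2 u1 su2 su3 d3 wU d2) []

-- ===== PRECONDITION & SPEC =====
-- Pre_ excludes the dicts on which Python raises KeyError; it also excludes dicts where a later
-- key is missing but an earlier pool is empty (A returns [] there without touching the later key,
-- while B looks all three keys up eagerly and raises).
def Pre_admissible_triples (pools : List (String × List Int)) : Prop :=
  (pools.lookup "U1").isSome ∧ (pools.lookup "SU2").isSome ∧ (pools.lookup "SU3").isSome
instance (pools : List (String × List Int)) : Decidable (Pre_admissible_triples pools) := by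
  unfold Pre_admissible_triples; infer_instance

def pvWitness_admissible_triples : (List (String × List Int)) :=
  [("U1", [3]), ("SU2", [2]), ("SU3", [1])]

def Spec_admissible_triples (pools : List (String × List Int)) (out : List (Int × Int × Int)) : Prop := out = admissible_triples_alt pools
instance (pools : List (String × List Int)) (out : List (Int × Int × Int)) : Decidable (Spec_admissible_triples pools out) := by unfold Spec_admissible_triples; infer_instance

-- ===== CLAIM (what is proved, stated in full; the proofs are below) =====
def Claim_equal_admissible_triples : Prop := ∀ (pools : List (String × List Int)), Dom_admissible_triples pools → Pre_admissible_triples pools → Spec_admissible_triples pools (admissible_triples pools)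

-- ===== LEMMAS AND PROOFS =====

-- the multiset A collects before sorting, as a flatMap
def rawT (u1 su2 su3 : List Int) : List (Int × Int × Int) :=
  u1.flatMap (fun w => su2.flatMap (fun a =>
    (su3.filter (fun b => decide (w > a ∧ a > b))).map (fun b => (w, a, b))))

lemma fold_eq_raw (u1 su2 su3 : List Int) :
    u1.foldl (fun acc wU =>
      su2.foldl (fun acc s2 =>
        su3.foldl (fun acc s3 =>
          if wU > s2 ∧ s2 > s3 then acc ++ [(wU, s2, s3)] else acc) acc) acc) []
    = rawT u1 su2 su3 := by
  have h3 : ∀ (w a : Int) (acc : List (Int × Int × Int)),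
      su3.foldl (fun acc s3 => if w > a ∧ a > s3 then acc ++ [(w, a, s3)] else acc) acc
        = acc ++ (su3.filter (fun b => decide (w > a ∧ a > b))).map (fun b => (w, a, b)) := by
    intro w a acc
    exact PySem.List.foldl_append_ite (fun s3 => w > a ∧ a > s3) (fun s3 => (w, a, s3)) su3 acc
  have h2 : ∀ (w : Int) (acc : List (Int × Int × Int)),
      su2.foldl (fun acc s2 =>
        su3.foldl (fun acc s3 => if w > s2 ∧ s2 > s3 then acc ++ [(w, s2, s3)] else acc) acc) acc
        = acc ++ su2.flatMap (fun a =>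
            (su3.filter (fun b => decide (w > a ∧ a > b))).map (fun b => (w, a, b))) := by
    intro w acc
    rw [PySem.List.foldl_congr_mem su2 _ (fun acc a =>
        acc ++ (su3.filter (fun b => decide (w > a ∧ a > b))).map (fun b => (w, a, b))) acc
        (by intro acc a _; exact h3 w a acc)]
    exact PySem.List.foldl_append_eq_flatMap _ su2 acc
  rw [PySem.List.foldl_congr_mem u1 _ (fun acc w =>
      acc ++ su2.flatMap (fun a =>
        (su3.filter (fun b => decide (w > a ∧ a > b))).map (fun b => (w, a, b)))) []
      (by intro acc w _; exact h2 w acc)]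
  simpa [rawT] using PySem.List.foldl_append_eq_flatMap (fun w => su2.flatMap (fun a =>
        (su3.filter (fun b => decide (w > a ∧ a > b))).map (fun b => (w, a, b)))) u1 []

lemma pvKey_inj : Function.Injective pvKey := by
  intro x y h
  unfold pvKey at h
  simp only [toLex_inj, Prod.mk.injEq] at h
  obtain ⟨h1, h2, h3⟩ := h
  exact Prod.ext h1 (Prod.ext h2 h3)

lemma pvKey_le_iff (x y : Int × Int × Int) :
    pvKey x ≤ pvKey y ↔
      x.1 < y.1 ∨ (x.1 = y.1 ∧ (x.2.1 < y.2.1 ∨ (x.2.1 = y.2.1 ∧ x.2.2 ≤ y.2.2))) := by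
  unfold pvKey
  rw [Prod.Lex.toLex_le_toLex, Prod.Lex.toLex_le_toLex]

lemma count_map_pair (l : List Int) (w a : Int) (t : Int × Int × Int) :
    (l.map (fun b => (w, a, b))).count t
      = if t.1 = w ∧ t.2.1 = a then l.count t.2.2 else 0 := by
  obtain ⟨t1, t2, t3⟩ := t
  dsimp only
  induction l with
  | nil => simp
  | cons b rest ih =>
    by_cases h1 : t1 = w <;> by_cases h2 : t2 = a <;> by_cases h3 : b = t3 <;>
      simp_all [List.count_cons, Prod.ext_iff] <;> omega

lemma count_blk (su3 : List Int) (w a : Int) (t : Int × Int × Int) :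
    ((su3.filter (fun b => decide (w > a ∧ a > b))).map (fun b => (w, a, b))).count t
      = if t.1 = w ∧ t.2.1 = a ∧ a < w ∧ t.2.2 < a then su3.count t.2.2 else 0 := by
  rw [count_map_pair]
  by_cases hc : w > a ∧ a > t.2.2
  · have : (su3.filter (fun b => decide (w > a ∧ a > b))).count t.2.2 = su3.count t.2.2 := by
      apply List.count_filter
      simpa using hc
    rw [this]
    by_cases h1 : t.1 = w ∧ t.2.1 = a
    · rw [if_pos h1, if_pos ⟨h1.1, h1.2, hc.1, hc.2⟩]
    · rw [if_neg h1, if_neg (by tauto)]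
  · have : (su3.filter (fun b => decide (w > a ∧ a > b))).count t.2.2 = 0 := by
      rw [List.count_eq_zero]
      intro hmem
      rw [List.mem_filter] at hmem
      exact hc (by simpa using hmem.2)
    rw [this]
    split_ifs <;> omega

lemma count_mid (su2 su3 : List Int) (w : Int) (t : Int × Int × Int) :
    (su2.flatMap (fun a =>
      (su3.filter (fun b => decide (w > a ∧ a > b))).map (fun b => (w, a, b)))).count t
      = if t.1 = w ∧ t.2.1 < w ∧ t.2.2 < t.2.1
        then su2.count t.2.1 * su3.count t.2.2 else 0 := by
  induction su2 with
  | nil => simp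
  | cons a rest ih =>
    rw [List.flatMap_cons, List.count_append, count_blk, ih, List.count_cons]
    by_cases h2 : t.2.1 = a
    · subst h2
      by_cases h1 : t.1 = w ∧ t.2.1 < w ∧ t.2.2 < t.2.1
      · rw [if_pos ⟨h1.1, rfl, h1.2.1, h1.2.2⟩, if_pos h1, if_pos h1]
        simp only [BEq.rfl, if_true]
        ring
      · rw [if_neg (fun h => h1 ⟨h.1, h.2.2.1, h.2.2.2⟩), if_neg h1, if_neg h1]
    · have hb : (a == t.2.1) = false := by
        simp only [beq_eq_false_iff_ne, ne_eq]
        exact fun h => h2 h.symm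
      rw [if_neg (fun h => h2 h.2.1), hb]
      split_ifs <;> simp_all

lemma count_raw (u1 su2 su3 : List Int) (t : Int × Int × Int) :
    (rawT u1 su2 su3).count t
      = if t.2.1 < t.1 ∧ t.2.2 < t.2.1
        then u1.count t.1 * su2.count t.2.1 * su3.count t.2.2 else 0 := by
  unfold rawT
  induction u1 with
  | nil => simp
  | cons w rest ih =>
    rw [List.flatMap_cons, List.count_append, count_mid, ih, List.count_cons]
    by_cases h2 : t.1 = w
    · subst h2
      by_cases h1 : t.2.1 < t.1 ∧ t.2.2 < t.2.1
      · rw [if_pos ⟨rfl, h1.1, h1.2⟩, if_pos h1, if_pos h1]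
        simp only [BEq.rfl, if_true]
        ring
      · rw [if_neg (fun h => h1 ⟨h.2.1, h.2.2⟩), if_neg h1, if_neg h1]
    · have hb : (w == t.1) = false := by
        simp only [beq_eq_false_iff_ne, ne_eq]
        exact fun h => h2 h.symm
      rw [if_neg (fun h => h2 h.1), hb]
      split_ifs <;> simp_all

lemma bLoop3_chunk (u1 su2 su3 : List Int) (w a s3 : Int) :
    PySem.List.pyRepeat [(w, a, s3)]
        ((PySem.List.count u1 w * PySem.List.count su2 a * PySem.List.count su3 s3 : Nat) : Int)
      = List.replicate (u1.count w * su2.count a * su3.count s3) (w, a, s3) := by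
  rw [PySem.List.pyRepeat_singleton]
  congr 1

lemma count_bLoop3 (u1 su2 su3 : List Int) (w a : Int) (d3 : List Int)
    (hd3 : d3.Pairwise (· < ·)) (t : Int × Int × Int) :
    (bLoop3 u1 su2 su3 w a d3).count t
      = if t.1 = w ∧ t.2.1 = a ∧ t.2.2 ∈ d3 ∧ t.2.2 < a
        then u1.count w * su2.count a * su3.count t.2.2 else 0 := by
  obtain ⟨t1, t2, t3⟩ := t
  dsimp only
  induction d3 with
  | nil => simp [bLoop3]
  | cons s3 rest ih =>
    rw [List.pairwise_cons] at hd3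
    rw [bLoop3]
    by_cases hge : s3 ≥ a
    · rw [if_pos hge, if_neg ?_]
      · simp
      · rintro ⟨-, -, hmem, hlt⟩
        rcases List.mem_cons.mp hmem with h | h
        · omega
        · exact absurd (hd3.1 _ h) (by omega)
    · rw [if_neg hge, List.count_append, bLoop3_chunk, List.count_replicate, ih hd3.2]
      simp only [beq_iff_eq, Prod.mk.injEq, List.mem_cons]
      have hs3 : s3 ∉ rest := fun h => absurd (hd3.1 _ h) (lt_irrefl _)
      by_cases e3 : t3 = s3
      · subst e3
        split_ifs <;> first | rfl | omega | tauto
      · split_ifs <;> first | rfl | omega | tauto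

lemma count_bLoop2 (u1 su2 su3 d3 : List Int) (w : Int) (d2 : List Int)
    (hd3 : d3.Pairwise (· < ·)) (hd2 : d2.Pairwise (· < ·)) (t : Int × Int × Int) :
    (bLoop2 u1 su2 su3 d3 w d2).count t
      = if t.1 = w ∧ t.2.1 ∈ d2 ∧ t.2.1 < w ∧ t.2.2 ∈ d3 ∧ t.2.2 < t.2.1
        then u1.count w * su2.count t.2.1 * su3.count t.2.2 else 0 := by
  obtain ⟨t1, t2, t3⟩ := t
  dsimp only
  induction d2 with
  | nil => simp [bLoop2]
  | cons s2 rest ih =>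
    rw [List.pairwise_cons] at hd2
    rw [bLoop2]
    by_cases hge : s2 ≥ w
    · rw [if_pos hge, if_neg ?_]
      · simp
      · rintro ⟨-, hmem, hlt, -, -⟩
        rcases List.mem_cons.mp hmem with h | h
        · omega
        · exact absurd (hd2.1 _ h) (by omega)
    · rw [if_neg hge, List.count_append, count_bLoop3 u1 su2 su3 w s2 d3 hd3, ih hd2.2]
      simp only [List.mem_cons]
      have hs2 : s2 ∉ rest := fun h => absurd (hd2.1 _ h) (lt_irrefl _)
      by_cases e2 : t2 = s2
      · subst e2
        split_ifs <;> simp_all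
      · split_ifs <;> simp_all

lemma count_bOuter (u1 su2 su3 d3 d2 : List Int) (d1 : List Int)
    (hd3 : d3.Pairwise (· < ·)) (hd2 : d2.Pairwise (· < ·)) (hd1 : d1.Pairwise (· < ·))
    (t : Int × Int × Int) :
    (d1.flatMap (fun w => bLoop2 u1 su2 su3 d3 w d2)).count t
      = if t.1 ∈ d1 ∧ t.2.1 ∈ d2 ∧ t.2.1 < t.1 ∧ t.2.2 ∈ d3 ∧ t.2.2 < t.2.1
        then u1.count t.1 * su2.count t.2.1 * su3.count t.2.2 else 0 := by
  obtain ⟨t1, t2, t3⟩ := t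
  dsimp only
  induction d1 with
  | nil => simp
  | cons w rest ih =>
    rw [List.pairwise_cons] at hd1
    rw [List.flatMap_cons, List.count_append, count_bLoop2 u1 su2 su3 d3 w d2 hd3 hd2, ih hd1.2]
    simp only [List.mem_cons]
    have hw : w ∉ rest := fun h => absurd (hd1.1 _ h) (lt_irrefl _)
    by_cases e1 : t1 = w
    · subst e1
      split_ifs <;> simp_all
    · split_ifs <;> simp_all

lemma mem_bLoop3 (u1 su2 su3 : List Int) (w a : Int) (d3 : List Int) (t : Int × Int × Int)
    (h : t ∈ bLoop3 u1 su2 su3 w a d3) : t.1 = w ∧ t.2.1 = a ∧ t.2.2 ∈ d3 ∧ t.2.2 < a := by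
  induction d3 with
  | nil => simp [bLoop3] at h
  | cons s3 rest ih =>
    rw [bLoop3] at h
    by_cases hge : s3 ≥ a
    · rw [if_pos hge] at h; simp at h
    · rw [if_neg hge, bLoop3_chunk, List.mem_append] at h
      rcases h with h | h
      · obtain ⟨x1, x2, x3⟩ := t
        have := List.eq_of_mem_replicate h
        simp only [Prod.mk.injEq] at this
        obtain ⟨e1, e2, e3⟩ := this
        subst e1; subst e2; subst e3
        exact ⟨rfl, rfl, List.mem_cons_self, by simpa using hge⟩
      · obtain ⟨h1, h2, h3, h4⟩ := ih h
        exact ⟨h1, h2, List.mem_cons_of_mem _ h3, h4⟩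

lemma mem_bLoop2 (u1 su2 su3 d3 : List Int) (w : Int) (d2 : List Int) (t : Int × Int × Int)
    (h : t ∈ bLoop2 u1 su2 su3 d3 w d2) : t.1 = w ∧ t.2.1 ∈ d2 := by
  induction d2 with
  | nil => simp [bLoop2] at h
  | cons s2 rest ih =>
    rw [bLoop2] at h
    by_cases hge : s2 ≥ w
    · rw [if_pos hge] at h; simp at h
    · rw [if_neg hge, List.mem_append] at h
      rcases h with h | h
      · obtain ⟨h1, h2, -, -⟩ := mem_bLoop3 u1 su2 su3 w s2 d3 t h
        exact ⟨h1, h2 ▸ List.mem_cons_self⟩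
      · obtain ⟨h1, h2⟩ := ih h
        exact ⟨h1, List.mem_cons_of_mem _ h2⟩

lemma pw_bLoop3 (u1 su2 su3 : List Int) (w a : Int) (d3 : List Int)
    (hd3 : d3.Pairwise (· < ·)) :
    (bLoop3 u1 su2 su3 w a d3).Pairwise (fun x y => pvKey x ≤ pvKey y) := by
  induction d3 with
  | nil => simp [bLoop3]
  | cons s3 rest ih =>
    rw [List.pairwise_cons] at hd3
    rw [bLoop3]
    by_cases hge : s3 ≥ a
    · rw [if_pos hge]; simp
    · rw [if_neg hge, bLoop3_chunk, List.pairwise_append]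
      refine ⟨List.pairwise_replicate.mpr (Or.inr (le_refl _)), ih hd3.2, ?_⟩
      intro x hx y hy
      have hxe := List.eq_of_mem_replicate hx
      subst hxe
      obtain ⟨h1, h2, h3, -⟩ := mem_bLoop3 u1 su2 su3 w a rest y hy
      rw [pvKey_le_iff]
      exact Or.inr ⟨h1.symm, Or.inr ⟨h2.symm, le_of_lt (hd3.1 _ h3)⟩⟩

lemma pw_bLoop2 (u1 su2 su3 d3 : List Int) (w : Int) (d2 : List Int)
    (hd3 : d3.Pairwise (· < ·)) (hd2 : d2.Pairwise (· < ·)) :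
    (bLoop2 u1 su2 su3 d3 w d2).Pairwise (fun x y => pvKey x ≤ pvKey y) := by
  induction d2 with
  | nil => simp [bLoop2]
  | cons s2 rest ih =>
    rw [List.pairwise_cons] at hd2
    rw [bLoop2]
    by_cases hge : s2 ≥ w
    · rw [if_pos hge]; simp
    · rw [if_neg hge, List.pairwise_append]
      refine ⟨pw_bLoop3 u1 su2 su3 w s2 d3 hd3, ih hd2.2, ?_⟩
      intro x hx y hy
      obtain ⟨hx1, hx2, -, -⟩ := mem_bLoop3 u1 su2 su3 w s2 d3 x hx
      obtain ⟨hy1, hy2⟩ := mem_bLoop2 u1 su2 su3 d3 w rest y hy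
      rw [pvKey_le_iff]
      exact Or.inr ⟨hx1.trans hy1.symm, Or.inl (hx2 ▸ hd2.1 _ hy2)⟩

lemma pw_bOuter (u1 su2 su3 d3 d2 : List Int) (d1 : List Int)
    (hd3 : d3.Pairwise (· < ·)) (hd2 : d2.Pairwise (· < ·)) (hd1 : d1.Pairwise (· < ·)) :
    (d1.flatMap (fun w => bLoop2 u1 su2 su3 d3 w d2)).Pairwise (fun x y => pvKey x ≤ pvKey y) := by
  induction d1 with
  | nil => simp
  | cons w rest ih =>
    rw [List.pairwise_cons] at hd1
    rw [List.flatMap_cons, List.pairwise_append]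
    refine ⟨pw_bLoop2 u1 su2 su3 d3 w d2 hd3 hd2, ih hd1.2, ?_⟩
    intro x hx y hy
    obtain ⟨hx1, -⟩ := mem_bLoop2 u1 su2 su3 d3 w d2 x hx
    rw [List.mem_flatMap] at hy
    obtain ⟨w', hw', hy⟩ := hy
    obtain ⟨hy1, -⟩ := mem_bLoop2 u1 su2 su3 d3 w' d2 y hy
    rw [pvKey_le_iff]
    exact Or.inl (by rw [hx1, hy1]; exact hd1.1 _ hw')


theorem admissible_triples_spec_aux (u1 su2 su3 : List Int) :
    PySem.List.sorted
        (u1.foldl (fun acc wU =>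
          su2.foldl (fun acc s2 =>
            su3.foldl (fun acc s3 =>
              if wU > s2 ∧ s2 > s3 then acc ++ [(wU, s2, s3)] else acc) acc) acc) [])
        pvKey false
      = (PySem.List.sorted (PySem.Set.ofList u1) (fun x => x) false).foldl
          (fun acc wU => acc ++ bLoop2 u1 su2 su3
            (PySem.List.sorted (PySem.Set.ofList su3) (fun x => x) false) wU
            (PySem.List.sorted (PySem.Set.ofList su2) (fun x => x) false)) [] := by
  rw [fold_eq_raw]
  set d1 := PySem.List.sorted (PySem.Set.ofList u1) (fun x => x) false with hd1def
  set d2 := PySem.List.sorted (PySem.Set.ofList su2) (fun x => x) false with hd2def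
  set d3 := PySem.List.sorted (PySem.Set.ofList su3) (fun x => x) false with hd3def
  have hd1 : d1.Pairwise (· < ·) := PySem.List.sorted_ofList_pairwise_lt u1
  have hd2 : d2.Pairwise (· < ·) := PySem.List.sorted_ofList_pairwise_lt su2
  have hd3 : d3.Pairwise (· < ·) := PySem.List.sorted_ofList_pairwise_lt su3
  rw [PySem.List.foldl_append_eq_flatMap, List.nil_append]
  have hcnt : ∀ t, (rawT u1 su2 su3).count t
      = (d1.flatMap (fun w => bLoop2 u1 su2 su3 d3 w d2)).count t := by
    intro t
    rw [count_raw, count_bOuter u1 su2 su3 d3 d2 d1 hd3 hd2 hd1]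
    have e1 : t.1 ∈ d1 ↔ t.1 ∈ u1 := by
      rw [hd1def, PySem.List.mem_sorted, PySem.Set.mem_ofList]
    have e2 : t.2.1 ∈ d2 ↔ t.2.1 ∈ su2 := by
      rw [hd2def, PySem.List.mem_sorted, PySem.Set.mem_ofList]
    have e3 : t.2.2 ∈ d3 ↔ t.2.2 ∈ su3 := by
      rw [hd3def, PySem.List.mem_sorted, PySem.Set.mem_ofList]
    by_cases m1 : t.1 ∈ u1 <;> by_cases m2 : t.2.1 ∈ su2 <;> by_cases m3 : t.2.2 ∈ su3 <;>
      simp [e1, e2, e3, m1, m2, m3, List.count_eq_zero_of_not_mem]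
  exact PySem.List.eq_of_perm_of_pairwise_le_of_injective pvKey pvKey_inj
    ((PySem.List.sorted_perm (rawT u1 su2 su3) pvKey false).trans
      (List.perm_iff_count.mpr hcnt))
    (PySem.List.sorted_pairwise (rawT u1 su2 su3) pvKey)
    (pw_bOuter u1 su2 su3 d3 d2 d1 hd3 hd2 hd1)

-- ===== VERDICT (by name: the statement is the Claim_ definition above) =====
theorem admissible_triples_spec : Claim_equal_admissible_triples := by
  intro pools _ hpre
  obtain ⟨h1, h2, h3⟩ := hpre
  unfold Spec_admissible_triples admissible_triples admissible_triples_alt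
  cases hu : pools.lookup "U1" with
  | none => rw [hu] at h1
  | some u1 =>
    cases hs2 : pools.lookup "SU2" with
    | none => rw [hs2] at h2
    | some su2 =>
      cases hs3 : pools.lookup "SU3" with
      | none => rw [hs3] at h3
      | some su3 =>
        exact admissible_triples_spec_aux u1 su2 su3
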